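-- pv_equiv track=rewrite | github.com/khasanjon-dev/Leetcode | solutions/522. Longest Uncommon Subsequence II/522.py | fin_lus_length
-- ===== SOURCE A (Python) =====
-- def fin_lus_length(strs: list[str]) -> int:
--     strs.sort(key=len, reverse=True)
--
--     def is_subsequence(a, b):
--         i = 0
--         len_a = len(a)
--         for s in b:
--             if i < len_a and a[i] == s:
--                 i += 1
--         return i == len_a
--
--     len_strs = len(strs)
--     max_length = -1
--     for i in range(len_strs):
--         for j in range(len_strs):
--             if i != j:
--                 if is_subsequence(strs[i], strs[j]):
--                     break
--         else:
--             return len(strs[i])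
--     return max_length
-- ===== SOURCE B (Python) =====
-- def fin_lus_length(strs: list[str]) -> int:
--     count = {}
--     for s in strs:
--         count[s] = count.get(s, 0) + 1
--
--     def is_subsequence(a, b):
--         it = iter(b)
--         return all(c in it for c in a)
--
--     best = -1
--     for s in strs:
--         if len(s) > best and count[s] == 1 and not any(
--                 len(t) > len(s) and is_subsequence(s, t) for t in strs):
--             best = len(s)
--     return best
-- ===== Notes on version B (the rewrite author's own statement) =====
-- stated objective: alternative
-- what changed: B eliminates A's sort and nested index-pair scan with early return: it builds a frequency table once, then makes a single max-accumulating pass over strings that occur exactly once, are longer than the current best, and are not a subsequence of any strictly longer string (equal-length distinct strings can never be subsequences, so length-sorting and same-length comparisons are unnecessary); return value only - A sorts the argument in place, B does not mutate it.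
import Mathlib
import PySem

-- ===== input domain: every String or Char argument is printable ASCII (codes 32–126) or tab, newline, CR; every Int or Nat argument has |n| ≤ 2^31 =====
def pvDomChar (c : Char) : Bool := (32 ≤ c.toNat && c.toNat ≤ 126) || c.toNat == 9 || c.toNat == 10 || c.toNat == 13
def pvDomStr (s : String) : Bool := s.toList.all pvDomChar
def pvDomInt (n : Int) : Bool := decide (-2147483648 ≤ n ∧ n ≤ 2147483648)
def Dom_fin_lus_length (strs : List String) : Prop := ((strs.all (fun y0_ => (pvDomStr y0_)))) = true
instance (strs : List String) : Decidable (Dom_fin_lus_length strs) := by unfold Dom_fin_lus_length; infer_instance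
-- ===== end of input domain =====

-- B drops A's sort and nested index-pair scan: it counts occurrences once and takes a max
-- over strings occurring exactly once that are not a subsequence of any strictly longer
-- string; equivalence is about the RETURN value only (A sorts the argument in place, B
-- does not mutate it).

-- ===== PORT A =====
-- is_subsequence: fold over b with a pointer i into a (len counted in chars; exact on ASCII)
def pySubStep (a : List Char) (i : Nat) (c : Char) : Nat :=
  if i < a.length ∧ a.getD i default = c then i + 1 else i

def pyIsSubsequence (a b : String) : Bool :=
  b.toList.foldl (pySubStep a.toList) 0 == a.toList.length

-- outer for-loop over i with early return; inner for/else-break loop is the short-circuit any over j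
def aLoop (ss : List String) : List Nat → Int
  | [] => -1
  | i :: rest =>
    if (List.range ss.length).any
        (fun j => decide (i ≠ j) && pyIsSubsequence (ss.getD i "") (ss.getD j "")) then
      aLoop ss rest
    else
      ((ss.getD i "").toList.length : Int)

def fin_lus_length (strs : List String) : Int :=
  let ss := PySem.List.sorted strs (fun s => (s.toList.length : Int)) true
  aLoop ss (List.range ss.length)

-- ===== PORT B =====
-- 'c in it' on an iterator: consume b up to (and including) the first c
def consumeTo (c : Char) : List Char → Option (List Char)
  | [] => none
  | b :: bs => if b = c then some bs else consumeTo c bs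

def isSubIter : List Char → List Char → Bool
  | [], _ => true
  | c :: cs, b =>
    match consumeTo c b with
    | none => false
    | some rest => isSubIter cs rest

def fin_lus_length_alt (strs : List String) : Int :=
  let cnt : PySem.Dict String Int :=
    strs.foldl (fun d x => d.insert x (d.getD x 0 + 1)) PySem.Dict.empty
  strs.foldl
    (fun best s =>
      if decide (best < (s.toList.length : Int)) &&
         (cnt.getD s 0 == 1 &&
          !(strs.any fun t =>
              decide (s.toList.length < t.toList.length) && isSubIter s.toList t.toList)) then
        (s.toList.length : Int)
      else best)
    (-1)

-- ===== PRECONDITION & SPEC =====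
def Spec_fin_lus_length (strs : List String) (out : Int) : Prop := out = fin_lus_length_alt strs
instance (strs : List String) (out : Int) : Decidable (Spec_fin_lus_length strs out) := by unfold Spec_fin_lus_length; infer_instance

-- ===== CLAIM (what is proved, stated in full; the proofs are below) =====
def Claim_equal_fin_lus_length : Prop := ∀ (strs : List String), Dom_fin_lus_length strs → Spec_fin_lus_length strs (fin_lus_length strs)

-- ===== LEMMAS AND PROOFS =====

-- the shared notion: s is "uncommon" in L (Bool, in B's phrasing)
def goodIn (L : List String) (s : String) : Bool :=
  decide (L.count s = 1) &&
  !(L.any fun t => decide (s.toList.length < t.toList.length) && isSubIter s.toList t.toList)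

-- ---- the two subsequence checks agree ----
lemma foldSub : ∀ (b rem pre : List Char),
    (b.foldl (pySubStep (pre ++ rem)) pre.length = (pre ++ rem).length) ↔ isSubIter rem b = true := by
  intro b
  induction b with
  | nil =>
    intro rem pre
    cases rem with
    | nil => simp [isSubIter]
    | cons c cs => simp [isSubIter, consumeTo]
  | cons x bs ih =>
    intro rem pre
    cases rem with
    | nil =>
      simp only [List.foldl_cons, List.append_nil, isSubIter]
      have hstep : pySubStep pre pre.length x = pre.length := by
        simp [pySubStep]
      rw [hstep]
      have := (ih [] pre)
      simp only [List.append_nil, isSubIter] at this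
      simp [this]
    | cons c cs =>
      simp only [List.foldl_cons]
      by_cases hx : c = x
      · subst hx
        have hstep : pySubStep (pre ++ c :: cs) pre.length c = pre.length + 1 := by
          simp [pySubStep]
        rw [hstep]
        have h2 : isSubIter (c :: cs) (c :: bs) = isSubIter cs bs := by
          simp [isSubIter, consumeTo]
        rw [h2]
        have := ih cs (pre ++ [c])
        simpa using this
      · have hstep : pySubStep (pre ++ c :: cs) pre.length x = pre.length := by
          simp [pySubStep, hx]
        rw [hstep]
        have h2 : isSubIter (c :: cs) (x :: bs) = isSubIter (c :: cs) bs := by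
          simp [isSubIter, consumeTo, Ne.symm hx]
        rw [h2]
        exact ih (c :: cs) pre

lemma sub_eq (a b : String) : pyIsSubsequence a b = isSubIter a.toList b.toList := by
  have h := foldSub b.toList a.toList []
  simp only [List.nil_append, List.length_nil] at h
  unfold pyIsSubsequence
  rw [Bool.eq_iff_iff, beq_iff_eq]
  exact h

lemma isSubIter_refl : ∀ a : List Char, isSubIter a a = true := by
  intro a
  induction a with
  | nil => simp [isSubIter]
  | cons c cs ih => simp [isSubIter, consumeTo, ih]

lemma consumeTo_some {c : Char} : ∀ {b rest : List Char}, consumeTo c b = some rest →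
    ∃ u, b = u ++ c :: rest := by
  intro b
  induction b with
  | nil => intro rest h; simp [consumeTo] at h
  | cons x bs ih =>
    intro rest h
    by_cases hx : x = c
    · subst hx
      simp [consumeTo] at h
      exact ⟨[], by simp [h]⟩
    · simp [consumeTo, hx] at h
      obtain ⟨u, hu⟩ := ih h
      exact ⟨x :: u, by simp [hu]⟩

lemma isSubIter_length_le : ∀ (a b : List Char), isSubIter a b = true → a.length ≤ b.length := by
  intro a
  induction a with
  | nil => intro b _; simp
  | cons c cs ih =>
    intro b h
    simp only [isSubIter] at h
    cases hc : consumeTo c b with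
    | none => rw [hc] at h; simp at h
    | some rest =>
      rw [hc] at h
      obtain ⟨u, hu⟩ := consumeTo_some hc
      have := ih rest h
      simp [hu]; omega

lemma isSubIter_eq_of_length_eq : ∀ (a b : List Char), isSubIter a b = true →
    a.length = b.length → a = b := by
  intro a
  induction a with
  | nil => intro b _ hl; cases b with | nil => rfl | cons x xs => simp at hl
  | cons c cs ih =>
    intro b h hl
    simp only [isSubIter] at h
    cases hc : consumeTo c b with
    | none => rw [hc] at h; simp at h
    | some rest =>
      rw [hc] at h
      obtain ⟨u, hu⟩ := consumeTo_some hc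
      have hle := isSubIter_length_le cs rest h
      have hu0 : u = [] := by
        subst hu; simp at hl
        have : u.length = 0 := by omega
        exact List.eq_nil_of_length_eq_zero this
      subst hu0
      simp only [List.nil_append] at hu
      subst hu
      have : cs = rest := ih rest h (by simp at hl; omega)
      rw [this]

-- ---- A's inner index loop scans exactly the other elements ----
lemma anyIdx (ss : List String) (k : Nat) (hk : k < ss.length) (p : String → Bool) :
    ((List.range ss.length).any (fun j => decide (k ≠ j) && p (ss.getD j "")))
      = ((ss.take k ++ ss.drop (k + 1)).any p) := by
  rw [Bool.eq_iff_iff]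
  simp only [List.any_eq_true, List.mem_range, Bool.and_eq_true, decide_eq_true_eq,
    List.mem_append]
  constructor
  · rintro ⟨j, hj, hne, hp⟩
    rw [List.getD_eq_getElem ss "" hj] at hp
    rcases Nat.lt_or_ge j k with hlt | hge
    · refine ⟨ss[j], Or.inl ?_, hp⟩
      have hjt : j < (ss.take k).length := by simp; omega
      have h1 : (ss.take k)[j] = ss[j] := List.getElem_take ..
      rw [← h1]; exact List.getElem_mem _
    · have hgt : k < j := by omega
      refine ⟨ss[j], Or.inr ?_, hp⟩
      have hjd : j - (k + 1) < (ss.drop (k + 1)).length := by simp; omega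
      refine List.mem_iff_getElem.mpr ⟨j - (k + 1), hjd, ?_⟩
      rw [List.getElem_drop]
      congr 1
      omega
  · rintro ⟨t, ht | ht, hp⟩
    · obtain ⟨i, hi, hti⟩ := List.mem_iff_getElem.mp ht
      have hik : i < k := by simp at hi; omega
      have hin : i < ss.length := by omega
      have h1 : (ss.take k)[i] = ss[i] := List.getElem_take ..
      refine ⟨i, hin, by omega, ?_⟩
      rw [List.getD_eq_getElem ss "" hin, ← h1, hti]; exact hp
    · obtain ⟨i, hi, hti⟩ := List.mem_iff_getElem.mp ht
      have hin : (k + 1) + i < ss.length := by simp at hi; omega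
      have h1 : (ss.drop (k + 1))[i] = ss[(k + 1) + i] := List.getElem_drop ..
      refine ⟨(k + 1) + i, hin, by omega, ?_⟩
      rw [List.getD_eq_getElem ss "" hin, ← h1, hti]; exact hp

-- ---- A's guard at an occurrence of s equals ¬ goodIn ----
lemma guard_iff (s : String) (pre suf : List String) :
    (((pre ++ suf).any fun t => isSubIter s.toList t.toList) = true) ↔
    goodIn (pre ++ s :: suf) s = false := by
  unfold goodIn
  set L := pre ++ s :: suf with hL
  have hcount : L.count s = (pre ++ suf).count s + 1 := by
    simp [hL, List.count_append]; omega
  rw [Bool.and_eq_false_iff]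
  constructor
  · rintro h
    obtain ⟨t, ht, hp⟩ := List.any_eq_true.mp h
    have hle := isSubIter_length_le _ _ hp
    rcases Nat.lt_or_ge s.toList.length t.toList.length with hlt | hge
    · right
      simp only [Bool.not_eq_false', List.any_eq_true, Bool.and_eq_true, decide_eq_true_eq]
      refine ⟨t, ?_, hlt, hp⟩
      rw [hL]
      rcases List.mem_append.mp ht with h | h
      · exact List.mem_append.mpr (Or.inl h)
      · exact List.mem_append.mpr (Or.inr (List.mem_cons_of_mem _ h))
    · have heqL : s.toList = t.toList := isSubIter_eq_of_length_eq _ _ hp (by omega)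
      have heq : s = t := String.toList_inj.mp heqL
      left
      have : 0 < (pre ++ suf).count s := List.count_pos_iff.mpr (by rw [heq]; exact ht)
      simp only [decide_eq_false_iff_not]
      omega
  · rintro (h | h)
    · simp only [decide_eq_false_iff_not] at h
      have : 0 < (pre ++ suf).count s := by omega
      have hmem : s ∈ pre ++ suf := List.count_pos_iff.mp this
      exact List.any_eq_true.mpr ⟨s, hmem, isSubIter_refl _⟩
    · simp only [Bool.not_eq_false', List.any_eq_true, Bool.and_eq_true, decide_eq_true_eq] at h
      obtain ⟨t, ht, hlt, hp⟩ := h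
      have htne : t ≠ s := fun he => by rw [he] at hlt; omega
      refine List.any_eq_true.mpr ⟨t, ?_, hp⟩
      rw [hL] at ht
      rcases List.mem_append.mp ht with h | h
      · exact List.mem_append.mpr (Or.inl h)
      · rcases List.mem_cons.mp h with h | h
        · exact absurd h htne
        · exact List.mem_append.mpr (Or.inr h)

-- goodIn only depends on the multiset of its first argument
lemma goodIn_perm {L₁ L₂ : List String} (h : L₁.Perm L₂) (s : String) :
    goodIn L₁ s = goodIn L₂ s := by
  unfold goodIn
  rw [h.count_eq]
  congr 1
  rw [Bool.eq_iff_iff]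
  simp only [Bool.not_eq_true', ← Bool.not_eq_true, List.any_eq_true]
  constructor <;> intro hh hq <;> apply hh
  · obtain ⟨t, ht, hp⟩ := hq; exact ⟨t, h.mem_iff.mpr ht, hp⟩
  · obtain ⟨t, ht, hp⟩ := hq; exact ⟨t, h.mem_iff.mp ht, hp⟩

-- first good element's length, walking a suffix of ss
def firstGood (ss : List String) : List String → Int
  | [] => -1
  | s :: rest => if goodIn ss s then (s.toList.length : Int) else firstGood ss rest

-- A's loop computes firstGood
lemma aLoop_eq_firstGood (ss : List String) : ∀ (suf pre : List String), ss = pre ++ suf →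
    aLoop ss (List.range' pre.length suf.length) = firstGood ss suf := by
  intro suf
  induction suf with
  | nil => intro pre _; simp [aLoop, firstGood]
  | cons s rest ih =>
    intro pre hss
    have hk : pre.length < ss.length := by rw [hss]; simp
    have htake : ss.take pre.length = pre := by rw [hss]; simp
    have hdrop : ss.drop (pre.length + 1) = rest := by
      have : ss = (pre ++ [s]) ++ rest := by rw [hss]; simp
      rw [this]
      have hlen : (pre ++ [s]).length = pre.length + 1 := by simp
      rw [← hlen, List.drop_left]
    have hgetD : ss.getD pre.length "" = s := by rw [hss]; simp
    simp only [List.length_cons, List.range'_succ, aLoop, firstGood, hgetD]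
    rw [anyIdx ss pre.length hk, htake, hdrop]
    have hsub : ((pre ++ rest).any fun j => pyIsSubsequence s j)
        = ((pre ++ rest).any fun t => isSubIter s.toList t.toList) := by
      simp only [sub_eq]
    rw [hsub]
    have hguard := guard_iff s pre rest
    rw [← hss] at hguard
    have hih := ih (pre ++ [s]) (by rw [hss]; simp)
    have hlen : (pre ++ [s]).length = pre.length + 1 := by simp
    rw [hlen] at hih
    by_cases hg : goodIn ss s = true
    · have hany : ((pre ++ rest).any fun t => isSubIter s.toList t.toList) = false := by
        cases hA : ((pre ++ rest).any fun t => isSubIter s.toList t.toList)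
        · rfl
        · rw [hguard.mp hA] at hg; exact absurd hg (by simp)
      rw [hany, hg]
      simp
    · rw [Bool.not_eq_true] at hg
      have hany : ((pre ++ rest).any fun t => isSubIter s.toList t.toList) = true :=
        hguard.mpr hg
      rw [hany, hg]
      simpa using hih

-- B's accumulating step
def bStep (L : List String) (best : Int) (s : String) : Int :=
  if decide (best < (s.toList.length : Int)) && goodIn L s then
    (s.toList.length : Int)
  else best

lemma bStep_rcomm (L : List String) (b : Int) (s t : String) :
    bStep L (bStep L b s) t = bStep L (bStep L b t) s := by
  unfold bStep
  by_cases hs : goodIn L s = true <;> by_cases ht : goodIn L t = true <;>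
    simp only [hs, ht, Bool.and_true, Bool.and_false] <;> split_ifs <;>
      simp_all only [decide_eq_true_eq] <;> omega

-- folding bStep over an all-shorter tail from a big accumulator changes nothing
lemma fold_bStep_const (L : List String) : ∀ (l : List String) (b : Int),
    (∀ t ∈ l, (t.toList.length : Int) ≤ b) → l.foldl (bStep L) b = b := by
  intro l
  induction l with
  | nil => intro b _; rfl
  | cons t rest ih =>
    intro b hb
    have hstep : bStep L b t = b := by
      unfold bStep
      have := hb t (by simp)
      rw [decide_eq_false (by omega)]
      simp
    simp only [List.foldl_cons, hstep]
    exact ih b (fun u hu => hb u (by simp [hu]))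

-- on a length-descending list, first good = max over goods
lemma firstGood_eq_fold (L : List String) : ∀ (l : List String),
    l.Pairwise (fun a b => (b.toList.length : Int) ≤ (a.toList.length : Int)) →
    firstGood L l = l.foldl (bStep L) (-1) := by
  intro l
  induction l with
  | nil => intro _; rfl
  | cons s rest ih =>
    intro hp
    have hhead := List.pairwise_cons.mp hp
    simp only [firstGood, List.foldl_cons]
    by_cases hg : goodIn L s = true
    · rw [hg]
      simp only [if_true]
      have hb : bStep L (-1) s = (s.toList.length : Int) := by
        unfold bStep
        rw [hg, decide_eq_true (by omega)]
        simp
      rw [hb, fold_bStep_const L rest _ hhead.1]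
    · rw [Bool.not_eq_true] at hg
      rw [hg]
      have hb : bStep L (-1) s = -1 := by unfold bStep; rw [hg]; simp
      simp only [hb]
      exact ih hhead.2

lemma intCount_beq (n : Nat) : (((n : Int)) == (1 : Int)) = decide (n = 1) := by
  rw [Bool.eq_iff_iff, beq_iff_eq, decide_eq_true_iff]
  omega

-- ===== VERDICT (by name: the statement is the Claim_ definition above) =====
theorem fin_lus_length_spec : Claim_equal_fin_lus_length := by
  intro strs _
  unfold Spec_fin_lus_length
  simp only [fin_lus_length, fin_lus_length_alt]
  set ss := PySem.List.sorted strs (fun s => (s.toList.length : Int)) true with hss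
  have hperm : ss.Perm strs := PySem.List.sorted_perm ..
  -- A's side: firstGood over the sorted list
  rw [List.range_eq_range']
  have hA : aLoop ss (List.range' 0 ss.length) = firstGood ss ss := by
    simpa using aLoop_eq_firstGood ss ss [] (by simp)
  rw [hA]
  -- B's side: rewrite the counter lookup under the binder, then read the step as bStep
  simp only [PySem.Dict.foldl_insert_getD_add_one_eq_counter, PySem.Dict.getD_counter,
    intCount_beq]
  show firstGood ss ss = List.foldl (bStep strs) (-1) strs
  -- goodIn over strs = goodIn over ss (permutation), pointwise in bStep
  have hbstep : bStep strs = bStep ss := by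
    funext b s; unfold bStep; rw [goodIn_perm hperm.symm s]
  -- fold over strs = fold over ss (right-commutative step, permutation)
  have hfold : strs.foldl (bStep strs) (-1) = ss.foldl (bStep strs) (-1) := by
    haveI : RightCommutative (bStep strs) := ⟨fun b s t => bStep_rcomm strs b s t⟩
    exact (hperm.foldl_eq (-1)).symm
  rw [hfold, hbstep]
  -- sortedness: lengths descend along ss
  have hpw : ss.Pairwise (fun a b => (b.toList.length : Int) ≤ (a.toList.length : Int)) :=
    PySem.List.sorted_pairwise_rev ..
  exact firstGood_eq_fold ss ss hpw
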